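-- pv_equiv track=rewrite | github.com/scottvr/phart | src/phart/rendering/nodes.py | _decode_graphviz_linebreak_escapes
-- ===== SOURCE A (Python) =====
-- def _decode_graphviz_linebreak_escapes(text: str) -> str:
--     """Decode Graphviz/DOT line-break escapes in label text.
--
--     Graphviz supports ``\\n``, ``\\l``, and ``\\r`` inside labels as line-break
--     controls. We normalize all three to ``\\n`` for PHART's line splitter.
--     """
--     out: list[str] = []
--     i = 0
--     while i < len(text):
--         ch = text[i]
--         if ch != "\\" or i + 1 >= len(text):
--             out.append(ch)
--             i += 1
--             continue
--
--         nxt = text[i + 1]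
--         if nxt in {"n", "l", "r"}:
--             out.append("\n")
--             i += 2
--             continue
--         if nxt == "\\":
--             out.append("\\")
--             i += 2
--             continue
--
--         # Preserve unknown escape sequences literally.
--         out.append("\\")
--         out.append(nxt)
--         i += 2
--     return "".join(out)
-- ===== SOURCE B (Python) =====
-- import re
--
-- def _decode_graphviz_linebreak_escapes(text: str) -> str:
--     def repl(m):
--         c = m.group(1)
--         if c in "nlr":
--             return "\n"
--         if c == "\\":
--             return "\\"
--         return "\\" + c
--
--     # '.' does not match '\n', so a backslash before a real newline stays literal,
--     # and a trailing lone backslash cannot match and stays literal.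
--     return re.sub(r"\\(.)", repl, text)
-- ===== Notes on version B (the rewrite author's own statement) =====
-- stated objective: idiomatic
-- what changed: Replaced the explicit index/lookahead while-loop building a char list with a single regex substitution re.sub over backslash-plus-any-character using a replacement function on the captured character; the dot not matching newline and an unmatchable trailing backslash preserve the corner behaviour naturally.
import Mathlib
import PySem

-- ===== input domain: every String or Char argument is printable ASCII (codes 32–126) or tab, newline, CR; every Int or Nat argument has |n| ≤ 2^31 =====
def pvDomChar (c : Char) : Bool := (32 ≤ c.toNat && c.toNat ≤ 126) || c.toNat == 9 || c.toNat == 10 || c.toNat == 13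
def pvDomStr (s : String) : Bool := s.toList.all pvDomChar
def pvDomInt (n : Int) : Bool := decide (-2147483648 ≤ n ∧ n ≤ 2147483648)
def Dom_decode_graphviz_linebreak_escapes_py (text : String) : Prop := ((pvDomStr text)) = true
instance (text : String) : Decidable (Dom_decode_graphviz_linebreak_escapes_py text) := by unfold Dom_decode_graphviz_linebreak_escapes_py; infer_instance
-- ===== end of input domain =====

-- B replaces A's explicit index/lookahead loop with a single regex substitution (re.sub with a replacement function) — same values, more idiomatic.


-- ===== PORT A =====
-- A: explicit index loop with lookahead, appending to an output list.
def pvGoA : List Char → List Char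
  | [] => []
  | [c] => [c]
  | c :: c2 :: rest =>
    if c ≠ '\\' then c :: pvGoA (c2 :: rest)
    else if c2 = 'n' ∨ c2 = 'l' ∨ c2 = 'r' then '\n' :: pvGoA rest
    else if c2 = '\\' then '\\' :: pvGoA rest
    else '\\' :: c2 :: pvGoA rest

def decode_graphviz_linebreak_escapes_py (text : String) : String :=
  String.ofList (pvGoA text.toList)

-- ===== PORT B =====
-- B: re.sub(r"\\(.)", repl, text); repl maps the captured char. Ported as the
-- left-to-right regex scan: a match is '\\' followed by any char except '\n'.
def pvRepl (c : Char) : List Char :=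
  if c = 'n' ∨ c = 'l' ∨ c = 'r' then ['\n']
  else if c = '\\' then ['\\']
  else ['\\', c]

def pvGoB : List Char → List Char
  | [] => []
  | '\\' :: c :: rest =>
    if c = '\n' then '\\' :: pvGoB ('\n' :: rest)   -- '.' does not match newline: no match here
    else pvRepl c ++ pvGoB rest
  | c :: rest => c :: pvGoB rest

def decode_graphviz_linebreak_escapes_py_alt (text : String) : String :=
  String.ofList (pvGoB text.toList)

-- ===== PRECONDITION & SPEC =====

def Spec_decode_graphviz_linebreak_escapes_py (text : String) (out : String) : Prop := out = decode_graphviz_linebreak_escapes_py_alt text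
instance (text : String) (out : String) : Decidable (Spec_decode_graphviz_linebreak_escapes_py text out) := by unfold Spec_decode_graphviz_linebreak_escapes_py; infer_instance

-- ===== CLAIM (what is proved, stated in full; the proofs are below) =====
def Claim_equal_decode_graphviz_linebreak_escapes_py : Prop := ∀ (text : String), Dom_decode_graphviz_linebreak_escapes_py text → Spec_decode_graphviz_linebreak_escapes_py text (decode_graphviz_linebreak_escapes_py text)

-- ===== LEMMAS AND PROOFS =====
theorem pvGoB_single (c : Char) : pvGoB [c] = [c] := by rw [pvGoB.eq_def]; split <;> simp_all [pvGoB]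
theorem pvGoB_bs (c : Char) (rest : List Char) :
    pvGoB ('\\' :: c :: rest) = if c = '\n' then '\\' :: pvGoB ('\n' :: rest) else pvRepl c ++ pvGoB rest := by
  rw [pvGoB.eq_def]; rfl
theorem pvGoB_other (c : Char) (rest : List Char) (h : c ≠ '\\') :
    pvGoB (c :: rest) = c :: pvGoB rest := by
  cases rest with
  | nil => rw [pvGoB_single, pvGoB]
  | cons c2 r => rw [pvGoB.eq_def]; simp [h]

theorem pvGoA_eq_pvGoB (l : List Char) : pvGoA l = pvGoB l := by
  induction l using pvGoA.induct with
  | case1 => simp [pvGoA, pvGoB]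
  | case2 c => exact (pvGoB_single c).symm
  | case3 c c2 rest h ih => rw [pvGoA, if_pos h, ih, pvGoB_other c (c2::rest) h]
  | case4 c c2 rest h1 h2 ih =>
    have hc : c = '\\' := not_not.mp h1
    subst hc
    have hn : c2 ≠ '\n' := by rcases h2 with h|h|h <;> simp [h]
    simp [pvGoA, pvGoB_bs, pvRepl, h2, hn, ih]
  | case5 c rest h1 h2 ih =>
    have hc : c = '\\' := not_not.mp h1
    subst hc
    simp [pvGoA, pvGoB_bs, pvRepl, ih]
  | case6 c c2 rest h1 h2 h3 ih =>
    have hc : c = '\\' := not_not.mp h1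
    subst hc
    by_cases hn : c2 = '\n' <;> simp [pvGoA, pvGoB_bs, pvGoB_other, pvRepl, h2, h3, hn, ih]

-- ===== VERDICT (by name: the statement is the Claim_ definition above) =====
theorem decode_graphviz_linebreak_escapes_py_spec : Claim_equal_decode_graphviz_linebreak_escapes_py := by
  intro text _
  unfold Spec_decode_graphviz_linebreak_escapes_py
  unfold decode_graphviz_linebreak_escapes_py decode_graphviz_linebreak_escapes_py_alt
  rw [pvGoA_eq_pvGoB]
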